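-- pv_equiv track=rewrite | github.com/zlochina/maze_visualisation | modules/maze_gen.py | complex_converter
-- ===== SOURCE A (Python) =====
-- def complex_converter(array_of_walls, m, n, type_of_walls):
--     matrix = []
--
--     # add dimensionality as to every elements is responsible for point,
--     # not for the full tile
--     m += 1
--     n += 1
--
--     # 3 dim array m x n x 2
--     for i in range(m):
--         matrix.append([])
--         for _ in range(n):
--             matrix[i].append([])
--
--     for m_i in range(m):
--         for n_i in range(n):
--             # filling matrix boundaries:
--             #   1) first number array is connection between
--             #      this point and upper point;
--             #   2) second number in array is coonection between
--             #      this point and left point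
--
--             if m_i == 0 and n_i == 0:
--                 matrix[m_i][n_i] = [0, 0]
--             elif m_i == m - 1 and n_i == 0:
--                 matrix[m_i][n_i] = [1, 0]
--             elif m_i == 0 and n_i == n - 1:
--                 matrix[m_i][n_i] = [0, 1]
--             elif m_i == m - 1 and n_i == n - 1:
--                 matrix[m_i][n_i] = [1, 1]
--             elif m_i == 0 or m_i == m - 1:
--                 matrix[m_i][n_i] = [0, 1]
--             elif n_i == 0 or n_i == n - 1:
--                 matrix[m_i][n_i] = [1, 0]
--             else:
--                 matrix[m_i][n_i] = [0, 0]
--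
--     if type_of_walls:
--         # thin walls
--         for m_i in range(m):
--             for n_i in range(n):
--                 # filling matrix walls
--
--                 # case with vertical wall
--                 if array_of_walls[m_i][n_i] % 2 == 1:
--                     matrix[m_i + 1][n_i][0] = 1
--                 # case with horizontal wall
--                 if array_of_walls[m_i][n_i] // 2 == 1:
--                     matrix[m_i][n_i + 1][1] = 1
--     else:
--         # thick walls
--         for m_i in range(m - 1):
--             for n_i in range(n - 1):
--                 # filling matrix walls
--                 if array_of_walls[m_i][n_i]:
--                     # add right and bottom wall
--                     matrix[m_i + 1][n_i + 1] = [1, 1]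
--
--                     # add upper wall
--                     matrix[m_i][n_i + 1][1] = 1
--
--                     # add left wall
--                     matrix[m_i + 1][n_i][0] = 1
--
--     return matrix
-- ===== SOURCE B (Python) =====
-- def complex_converter(array_of_walls, m, n, type_of_walls):
--     # One pure pass: compute each point's final [up-connection, left-connection]
--     # directly from closed-form boundary predicates OR'ed with the wall terms.
--     m += 1
--     n += 1
--
--     def cell(i, j):
--         v = (j == 0 or j == n - 1) and i > 0
--         h = (i == 0 or i == m - 1) and j > 0
--         if type_of_walls:
--             v = v or (1 <= i and array_of_walls[i - 1][j] % 2 == 1)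
--             h = h or (1 <= j and array_of_walls[i][j - 1] // 2 == 1)
--         else:
--             def blocked(a, b):
--                 return 0 <= a < m - 1 and 0 <= b < n - 1 and array_of_walls[a][b] != 0
--             v = v or blocked(i - 1, j - 1) or blocked(i - 1, j)
--             h = h or blocked(i - 1, j - 1) or blocked(i, j - 1)
--         return [int(v), int(h)]
--
--     return [[cell(i, j) for j in range(n)] for i in range(m)]
-- ===== Notes on version B (the rewrite author's own statement) =====
-- stated objective: simpler
-- what changed: A allocates an (m+1)x(n+1) matrix of empty cells, fills boundaries with a 7-way branch per cell, then mutates cells in place in a second wall pass; B is a single pure nested comprehension that computes each point's final [up,left] pair directly as closed-form boundary predicates OR'ed with the wall terms, with no allocation/mutation passes at all.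
import Mathlib
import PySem

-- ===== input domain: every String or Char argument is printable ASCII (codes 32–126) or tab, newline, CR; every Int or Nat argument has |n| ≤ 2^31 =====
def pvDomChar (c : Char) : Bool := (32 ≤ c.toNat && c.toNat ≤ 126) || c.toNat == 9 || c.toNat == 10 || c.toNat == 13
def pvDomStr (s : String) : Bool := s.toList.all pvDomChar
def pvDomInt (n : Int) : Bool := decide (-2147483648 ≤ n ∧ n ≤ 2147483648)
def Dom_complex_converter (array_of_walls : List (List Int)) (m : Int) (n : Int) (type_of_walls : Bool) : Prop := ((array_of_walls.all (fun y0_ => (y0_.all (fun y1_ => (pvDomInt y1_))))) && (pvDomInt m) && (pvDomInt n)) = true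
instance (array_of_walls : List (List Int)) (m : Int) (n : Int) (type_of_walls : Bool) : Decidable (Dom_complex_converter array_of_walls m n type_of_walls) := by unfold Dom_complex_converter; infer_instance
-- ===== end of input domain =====

-- B replaces A's allocate / boundary-branch / in-place wall-mutation passes by one pure
-- per-point closed-form comprehension (objective: simpler).

-- ===== PORT A =====
-- Python 'matrix[i][j] = v' (indices in range under Pre_): nested List.set
def pvSet2 (mat : List (List (List Int))) (i j : Nat) (v : List Int) : List (List (List Int)) :=
  mat.set i ((mat.getD i []).set j v)

-- Python 'matrix[i][j][k] = v'
def pvSet3 (mat : List (List (List Int))) (i j k : Nat) (v : Int) : List (List (List Int)) :=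
  pvSet2 mat i j (((mat.getD i []).getD j []).set k v)

-- A's per-cell boundary branch chain, in A's branch order
def pvBound (M N i j : Nat) : List Int :=
  if i = 0 ∧ j = 0 then [0, 0]
  else if i = M - 1 ∧ j = 0 then [1, 0]
  else if i = 0 ∧ j = N - 1 then [0, 1]
  else if i = M - 1 ∧ j = N - 1 then [1, 1]
  else if i = 0 ∨ i = M - 1 then [0, 1]
  else if j = 0 ∨ j = N - 1 then [1, 0]
  else [0, 0]

-- literal port of A: Python 'range(m)' after 'm += 1' = indices 0..(m+1).toNat-1
-- (empty when m+1 ≤ 0); 'array_of_walls[i][j]' is in range under Pre_, ported with getD.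
def complex_converter (array_of_walls : List (List Int)) (m : Int) (n : Int) (type_of_walls : Bool) : List (List (List Int)) :=
  let M : Nat := (m + 1).toNat
  let N : Nat := (n + 1).toNat
  -- build m x n x 2 skeleton by repeated append
  let matrix : List (List (List Int)) :=
    (List.range M).foldl (fun mat _ => mat ++ [(List.range N).foldl (fun row _ => row ++ [([] : List Int)]) []]) []
  -- filling matrix boundaries
  let matrix :=
    (List.range M).foldl (fun mat i => (List.range N).foldl (fun mat j => pvSet2 mat i j (pvBound M N i j)) mat) matrix
  if type_of_walls then
    -- thin walls
    (List.range M).foldl (fun mat i => (List.range N).foldl (fun mat j =>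
      let w := (array_of_walls.getD i []).getD j 0
      let mat := if PySem.Int.mod w 2 = 1 then pvSet3 mat (i + 1) j 0 1 else mat
      if PySem.Int.floordiv w 2 = 1 then pvSet3 mat i (j + 1) 1 1 else mat) mat) matrix
  else
    -- thick walls
    (List.range (M - 1)).foldl (fun mat i => (List.range (N - 1)).foldl (fun mat j =>
      if (array_of_walls.getD i []).getD j 0 ≠ 0 then
        let mat := pvSet2 mat (i + 1) (j + 1) [1, 1]
        let mat := pvSet3 mat i (j + 1) 1 1
        pvSet3 mat (i + 1) j 0 1
      else mat) mat) matrix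

-- ===== PORT B =====
-- Source B's 'blocked(a, b)' helper (Int arguments, bounds checked before indexing)
def pvBlocked (array_of_walls : List (List Int)) (m n : Int) (p q : Int) : Bool :=
  decide (0 ≤ p) && decide (p < m) && decide (0 ≤ q) && decide (q < n) &&
    ((array_of_walls.getD p.toNat []).getD q.toNat 0 != 0)

-- Source B's 'cell(i, j)'
def pvCellB (array_of_walls : List (List Int)) (m n : Int) (type_of_walls : Bool)
    (M N i j : Nat) : List Int :=
  let v := (decide (j = 0) || decide (j = N - 1)) && decide (0 < i)
  let h := (decide (i = 0) || decide (i = M - 1)) && decide (0 < j)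
  if type_of_walls then
    let v := v || (decide (1 ≤ i) && decide (PySem.Int.mod ((array_of_walls.getD (i - 1) []).getD j 0) 2 = 1))
    let h := h || (decide (1 ≤ j) && decide (PySem.Int.floordiv ((array_of_walls.getD i []).getD (j - 1) 0) 2 = 1))
    [if v then 1 else 0, if h then 1 else 0]
  else
    let v := v || pvBlocked array_of_walls m n ((i : Int) - 1) ((j : Int) - 1) || pvBlocked array_of_walls m n ((i : Int) - 1) (j : Int)
    let h := h || pvBlocked array_of_walls m n ((i : Int) - 1) ((j : Int) - 1) || pvBlocked array_of_walls m n (i : Int) ((j : Int) - 1)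
    [if v then 1 else 0, if h then 1 else 0]

def complex_converter_alt (array_of_walls : List (List Int)) (m : Int) (n : Int) (type_of_walls : Bool) : List (List (List Int)) :=
  let M : Nat := (m + 1).toNat
  let N : Nat := (n + 1).toNat
  (List.range M).map (fun i => (List.range N).map (fun j => pvCellB array_of_walls m n type_of_walls M N i j))

-- ===== PRECONDITION & SPEC =====
-- Pre_ = exactly the inputs on which Python A returns (no IndexError): the wall array is
-- large enough for the scanned region, and (thin walls) no vertical wall in the last row /
-- horizontal wall in the last column, which would make A write one row/column past the matrix.
def Pre_complex_converter (array_of_walls : List (List Int)) (m : Int) (n : Int) (type_of_walls : Bool) : Prop :=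
  if type_of_walls then
    (m + 1).toNat = 0 ∨ (n + 1).toNat = 0 ∨
      ((m + 1).toNat ≤ array_of_walls.length ∧
       (∀ i < (m + 1).toNat, (n + 1).toNat ≤ (array_of_walls.getD i []).length) ∧
       (∀ j < (n + 1).toNat, PySem.Int.mod ((array_of_walls.getD ((m + 1).toNat - 1) []).getD j 0) 2 ≠ 1) ∧
       (∀ i < (m + 1).toNat, PySem.Int.floordiv ((array_of_walls.getD i []).getD ((n + 1).toNat - 1) 0) 2 ≠ 1))
  else
    (m + 1).toNat ≤ 1 ∨ (n + 1).toNat ≤ 1 ∨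
      ((m + 1).toNat - 1 ≤ array_of_walls.length ∧
       ∀ i < (m + 1).toNat - 1, (n + 1).toNat - 1 ≤ (array_of_walls.getD i []).length)

instance (array_of_walls : List (List Int)) (m : Int) (n : Int) (type_of_walls : Bool) : Decidable (Pre_complex_converter array_of_walls m n type_of_walls) := by
  unfold Pre_complex_converter; infer_instance

def pvWitness_complex_converter : List (List Int) × Int × Int × Bool := ([[1, 0], [0, 0]], 1, 1, true)

def Spec_complex_converter (array_of_walls : List (List Int)) (m : Int) (n : Int) (type_of_walls : Bool) (out : List (List (List Int))) : Prop := out = complex_converter_alt array_of_walls m n type_of_walls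
instance (array_of_walls : List (List Int)) (m : Int) (n : Int) (type_of_walls : Bool) (out : List (List (List Int))) : Decidable (Spec_complex_converter array_of_walls m n type_of_walls out) := by unfold Spec_complex_converter; infer_instance

-- ===== CLAIM (what is proved, stated in full; the proofs are below) =====
def Claim_equal_complex_converter : Prop := ∀ (array_of_walls : List (List Int)) (m : Int) (n : Int) (type_of_walls : Bool), Dom_complex_converter array_of_walls m n type_of_walls → Pre_complex_converter array_of_walls m n type_of_walls → Spec_complex_converter array_of_walls m n type_of_walls (complex_converter array_of_walls m n type_of_walls)

-- ===== LEMMAS AND PROOFS =====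

-- matrix in "map form": entry (i,j) is f i j
def mform (M N : Nat) (f : Nat → Nat → List Int) : List (List (List Int)) :=
  (List.range M).map (fun i => (List.range N).map (fun j => f i j))

-- map form with 2-component cells given by a pair-valued function
def mform2 (M N : Nat) (f : Nat → Nat → Int × Int) : List (List (List Int)) :=
  mform M N (fun i j => [(f i j).1, (f i j).2])

-- all cell coordinates, row-major (the order of A's double loops)
def cellsL (M N : Nat) : List (Nat × Nat) :=
  (List.range M).flatMap (fun i => (List.range N).map (fun j => (i, j)))

-- one component-set event: set component e.2.2 of cell (e.1, e.2.1) to 1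
def applyEv (mat : List (List (List Int))) (e : Nat × Nat × Nat) : List (List (List Int)) :=
  pvSet3 mat e.1 e.2.1 e.2.2 1

-- effect of one event on a cell pair
def updP (k : Nat) (p : Int × Int) : Int × Int := if k = 0 then (1, p.2) else (p.1, 1)

-- events generated by one cell of A's thin-wall loop, in A's order
def evsThin (a : List (List Int)) (p : Nat × Nat) : List (Nat × Nat × Nat) :=
  (if PySem.Int.mod ((a.getD p.1 []).getD p.2 0) 2 = 1 then [(p.1 + 1, p.2, 0)] else []) ++
  (if PySem.Int.floordiv ((a.getD p.1 []).getD p.2 0) 2 = 1 then [(p.1, p.2 + 1, 1)] else [])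

-- events generated by one cell of A's thick-wall loop, in A's order
def evsThick (a : List (List Int)) (p : Nat × Nat) : List (Nat × Nat × Nat) :=
  if (a.getD p.1 []).getD p.2 0 ≠ 0 then
    [(p.1 + 1, p.2 + 1, 0), (p.1 + 1, p.2 + 1, 1), (p.1, p.2 + 1, 1), (p.1 + 1, p.2, 0)]
  else []

-- the boundary branch chain as the pair of B's two boundary predicates
def basePair (M N i j : Nat) : Int × Int :=
  (if (j = 0 ∨ j = N - 1) ∧ 0 < i then 1 else 0, if (i = 0 ∨ i = M - 1) ∧ 0 < j then 1 else 0)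

lemma set_map_range {α : Type} (M r : Nat) (g : Nat → α) (v : α) :
    ((List.range M).map g).set r v = (List.range M).map (fun i => if i = r then v else g i) := by
  apply List.ext_getElem
  · simp
  · intro k h1 h2
    simp only [List.getElem_set, List.getElem_map, List.getElem_range]
    by_cases hk : r = k
    · simp [hk]
    · simp [hk, Ne.symm hk]

lemma getD_map_range' {α : Type} (N c : Nat) (g : Nat → α) (d : α) (hc : c < N) :
    ((List.range N).map g).getD c d = g c := by
  rw [List.getD_eq_getElem?_getD]; simp [hc]

lemma getD_mform (M N : Nat) (f : Nat → Nat → List Int) (i : Nat) (hi : i < M) :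
    (mform M N f).getD i [] = (List.range N).map (fun j => f i j) := by
  unfold mform; exact getD_map_range' M i _ [] hi

lemma mform_congr (M N : Nat) (f g : Nat → Nat → List Int)
    (h : ∀ i < M, ∀ j < N, f i j = g i j) : mform M N f = mform M N g := by
  unfold mform
  apply List.map_congr_left
  intro i hi
  apply List.map_congr_left
  intro j hj
  exact h i (List.mem_range.mp hi) j (List.mem_range.mp hj)

lemma mform2_congr (M N : Nat) (f g : Nat → Nat → Int × Int)
    (h : ∀ i < M, ∀ j < N, f i j = g i j) : mform2 M N f = mform2 M N g := by
  unfold mform2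
  apply mform_congr
  intro i hi j hj
  rw [h i hi j hj]

lemma pvSet2_mform (M N : Nat) (f : Nat → Nat → List Int) (r c : Nat) (hr : r < M) (hc : c < N) (v : List Int) :
    pvSet2 (mform M N f) r c v = mform M N (fun i j => if i = r ∧ j = c then v else f i j) := by
  unfold pvSet2
  rw [getD_mform M N f r hr, set_map_range N c _ v]
  show (mform M N f).set r _ = _
  unfold mform
  rw [set_map_range M r _ _]
  apply List.map_congr_left
  intro i _
  by_cases hi : i = r
  · subst hi
    simp only [if_pos rfl]
    apply List.map_congr_left
    intro j _
    by_cases hj : j = c <;> simp [hj]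
  · simp only [if_neg hi]
    apply List.map_congr_left
    intro j _
    simp [hi]

lemma applyEv_mform2 (M N : Nat) (f : Nat → Nat → Int × Int) (r c k : Nat)
    (hr : r < M) (hc : c < N) (hk : k < 2) :
    applyEv (mform2 M N f) (r, c, k) = mform2 M N (fun i j => if i = r ∧ j = c then updP k (f i j) else f i j) := by
  unfold applyEv pvSet3 mform2
  rw [getD_mform M N _ r hr, getD_map_range' N c _ [] hc, pvSet2_mform M N _ r c hr hc]
  apply mform_congr
  intro i _ j _
  by_cases hij : i = r ∧ j = c
  · obtain ⟨hi, hj⟩ := hij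
    subst hi; subst hj
    interval_cases k <;> simp [updP]
  · simp [hij]

lemma mem_cellsL (M N : Nat) (p : Nat × Nat) : p ∈ cellsL M N ↔ p.1 < M ∧ p.2 < N := by
  obtain ⟨x, y⟩ := p
  simp [cellsL, List.mem_flatMap]

lemma foldl_append_range {α : Type} (x : α) : ∀ (N : Nat) (init : List α),
    (List.range N).foldl (fun row _ => row ++ [x]) init = init ++ List.replicate N x := by
  intro N
  induction N with
  | zero => simp
  | succ k ih => intro init; simp [List.range_succ, ih, List.replicate_succ']

-- stage 1: the append-build loops produce the all-empty map form
lemma build_eq (M N : Nat) :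
    ((List.range M).foldl (fun mat _ => mat ++ [(List.range N).foldl (fun row _ => row ++ [([] : List Int)]) []]) [])
      = mform M N (fun _ _ => []) := by
  rw [foldl_append_range, foldl_append_range]
  unfold mform
  simp [List.map_const']

-- nested foldl over ranges = foldl over the row-major cell list
lemma foldl_cells {β : Type} (N : Nat) (g : β → Nat → Nat → β) : ∀ (M : Nat) (b : β),
    (List.range M).foldl (fun x i => (List.range N).foldl (fun y j => g y i j) x) b
      = (cellsL M N).foldl (fun x p => g x p.1 p.2) b := by
  intro M
  unfold cellsL
  induction M with
  | zero => simp
  | succ k ih =>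
    intro b
    simp only [List.range_succ, List.flatMap_append, List.foldl_append, List.foldl_map, ih,
      List.flatMap_singleton, List.foldl_cons, List.foldl_nil]

-- stage 2 core: folding whole-cell assignments over any key list inside the matrix
lemma assign_fold (M N : Nat) (g : Nat → Nat → List Int) :
    ∀ (E : List (Nat × Nat)) (f : Nat → Nat → List Int), (∀ p ∈ E, p.1 < M ∧ p.2 < N) →
      E.foldl (fun mat p => pvSet2 mat p.1 p.2 (g p.1 p.2)) (mform M N f)
        = mform M N (fun i j => if (i, j) ∈ E then g i j else f i j) := by
  intro E
  induction E with
  | nil => intro f _; simp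
  | cons e E ih =>
    intro f h
    obtain ⟨r, c⟩ := e
    obtain ⟨hr, hc⟩ := h (r, c) List.mem_cons_self
    rw [List.foldl_cons, pvSet2_mform M N f r c hr hc,
        ih _ (fun p hp => h p (List.mem_cons_of_mem _ hp))]
    apply mform_congr
    intro i _ j _
    by_cases hij : i = r ∧ j = c <;> by_cases h0 : (i, j) ∈ E <;>
      simp [List.mem_cons, Prod.ext_iff, hij, h0]

-- stage 3 core: folding component-set events over the matrix
lemma ev_fold (M N : Nat) :
    ∀ (E : List (Nat × Nat × Nat)) (f : Nat → Nat → Int × Int),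
      (∀ e ∈ E, e.1 < M ∧ e.2.1 < N ∧ e.2.2 < 2) →
      E.foldl applyEv (mform2 M N f)
        = mform2 M N (fun i j =>
            (if (i, j, 0) ∈ E then 1 else (f i j).1, if (i, j, 1) ∈ E then 1 else (f i j).2)) := by
  intro E
  induction E with
  | nil => intro f _; simp [mform2]
  | cons e E ih =>
    intro f h
    obtain ⟨r, c, k⟩ := e
    obtain ⟨hr, hc, hk⟩ := h (r, c, k) List.mem_cons_self
    rw [List.foldl_cons, applyEv_mform2 M N f r c k hr hc hk,
        ih _ (fun p hp => h p (List.mem_cons_of_mem _ hp))]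
    unfold mform2
    apply mform_congr
    intro i _ j _
    interval_cases k <;>
      by_cases hij : i = r ∧ j = c <;>
      by_cases h0 : (i, j, 0) ∈ E <;> by_cases h1 : (i, j, 1) ∈ E <;>
      simp [updP, List.mem_cons, Prod.ext_iff, hij, h0, h1]

-- a cell-indexed body that acts as its event list turns the whole fold into one event fold
lemma fold_body_events (M N : Nat) (body : List (List (List Int)) → Nat × Nat → List (List (List Int)))
    (evs : Nat × Nat → List (Nat × Nat × Nat)) :
    ∀ (cells : List (Nat × Nat)) (f : Nat → Nat → Int × Int),
      (∀ (f2 : Nat → Nat → Int × Int) c, c ∈ cells → body (mform2 M N f2) c = (evs c).foldl applyEv (mform2 M N f2)) →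
      (∀ c ∈ cells, ∀ e ∈ evs c, e.1 < M ∧ e.2.1 < N ∧ e.2.2 < 2) →
      cells.foldl body (mform2 M N f) = (cells.flatMap evs).foldl applyEv (mform2 M N f) := by
  intro cells
  induction cells with
  | nil => intro f _ _; simp
  | cons c cs ih =>
    intro f hbody hrange
    rw [List.foldl_cons, hbody f c List.mem_cons_self,
        ev_fold M N _ f (hrange c List.mem_cons_self),
        ih _ (fun f2 c2 hc2 => hbody f2 c2 (List.mem_cons_of_mem _ hc2))
             (fun c2 hc2 => hrange c2 (List.mem_cons_of_mem _ hc2)),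
        List.flatMap_cons, List.foldl_append,
        ev_fold M N _ f (hrange c List.mem_cons_self)]

lemma pvBound_eq (M N i j : Nat) (hi : i < M) (hj : j < N) :
    pvBound M N i j = [(basePair M N i j).1, (basePair M N i j).2] := by
  unfold pvBound basePair
  split_ifs <;> simp_all <;> omega

-- stage 2: building + boundary filling yields the basePair map form
lemma stage2_eq (M N : Nat) :
    ((List.range M).foldl (fun mat i => (List.range N).foldl (fun mat j => pvSet2 mat i j (pvBound M N i j)) mat)
      (mform M N (fun _ _ => []))) = mform2 M N (basePair M N) := by
  rw [foldl_cells N (fun y i j => pvSet2 y i j (pvBound M N i j)) M]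
  rw [assign_fold M N (fun i j => pvBound M N i j) (cellsL M N) _
        (fun p hp => (mem_cellsL M N p).mp hp)]
  unfold mform2
  apply mform_congr
  intro i hi j hj
  rw [if_pos ((mem_cellsL M N (i, j)).mpr ⟨hi, hj⟩)]
  exact pvBound_eq M N i j hi hj

lemma mem_if_singleton {α : Type} (c : Prop) [Decidable c] (x e : α) :
    x ∈ (if c then [e] else []) ↔ c ∧ x = e := by
  split <;> simp_all

lemma mem_if_nil {α : Type} (c : Prop) [Decidable c] (x : α) (l : List α) :
    x ∈ (if c then l else []) ↔ c ∧ x ∈ l := by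
  split <;> simp_all

-- membership characterisations of the generated event lists
lemma memThin (a : List (List Int)) (M N : Nat) (x y k : Nat) :
    (x, y, k) ∈ (cellsL M N).flatMap (evsThin a) ↔
      (∃ i < M, ∃ j < N,
        (PySem.Int.mod ((a.getD i []).getD j 0) 2 = 1 ∧ x = i + 1 ∧ y = j ∧ k = 0) ∨
        (PySem.Int.floordiv ((a.getD i []).getD j 0) 2 = 1 ∧ x = i ∧ y = j + 1 ∧ k = 1)) := by
  simp only [List.mem_flatMap, mem_cellsL, evsThin, List.mem_append, mem_if_singleton,
    Prod.mk.injEq]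
  constructor
  · rintro ⟨⟨i, j⟩, ⟨hi, hj⟩, h⟩
    exact ⟨i, hi, j, hj, by tauto⟩
  · rintro ⟨i, hi, j, hj, h⟩
    exact ⟨(i, j), ⟨hi, hj⟩, by tauto⟩

lemma memThick (a : List (List Int)) (M N : Nat) (x y k : Nat) :
    (x, y, k) ∈ (cellsL M N).flatMap (evsThick a) ↔
      (∃ i < M, ∃ j < N, (a.getD i []).getD j 0 ≠ 0 ∧
        ((x = i + 1 ∧ y = j + 1 ∧ k = 0) ∨ (x = i + 1 ∧ y = j + 1 ∧ k = 1) ∨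
         (x = i ∧ y = j + 1 ∧ k = 1) ∨ (x = i + 1 ∧ y = j ∧ k = 0))) := by
  simp only [List.mem_flatMap, mem_cellsL, evsThick, mem_if_nil, List.mem_cons,
    List.not_mem_nil, or_false, Prod.mk.injEq]
  constructor
  · rintro ⟨⟨i, j⟩, ⟨hi, hj⟩, h⟩
    exact ⟨i, hi, j, hj, by tauto⟩
  · rintro ⟨i, hi, j, hj, h⟩
    exact ⟨(i, j), ⟨hi, hj⟩, by tauto⟩

-- A's thin-wall body is its event list (on any matrix)
lemma bodyThin_ev (a : List (List Int)) (mat : List (List (List Int))) (i j : Nat) :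
    (let w := (a.getD i []).getD j 0
     let mat2 := if PySem.Int.mod w 2 = 1 then pvSet3 mat (i + 1) j 0 1 else mat
     if PySem.Int.floordiv w 2 = 1 then pvSet3 mat2 i (j + 1) 1 1 else mat2)
      = (evsThin a (i, j)).foldl applyEv mat := by
  dsimp only [evsThin]
  split_ifs <;> simp [applyEv]

lemma pvSet2_mform2_11 (M N : Nat) (f : Nat → Nat → Int × Int) (r c : Nat) (hr : r < M) (hc : c < N) :
    pvSet2 (mform2 M N f) r c [1, 1] = mform2 M N (fun x y => if x = r ∧ y = c then (1, 1) else f x y) := by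
  unfold mform2
  rw [pvSet2_mform M N _ r c hr hc]
  apply mform_congr
  intro x _ y _
  by_cases h : x = r ∧ y = c <;> simp [h]

-- A's thick-wall body is its event list (on 2-component map-form matrices)
lemma bodyThick_ev (a : List (List Int)) (M N : Nat) (f : Nat → Nat → Int × Int) (i j : Nat)
    (hi : i + 1 < M) (hj : j + 1 < N) :
    ((if (a.getD i []).getD j 0 ≠ 0 then
        pvSet3 (pvSet3 (pvSet2 (mform2 M N f) (i + 1) (j + 1) [1, 1]) i (j + 1) 1 1) (i + 1) j 0 1
      else mform2 M N f))
      = (evsThick a (i, j)).foldl applyEv (mform2 M N f) := by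
  dsimp only [evsThick]
  split_ifs with hc
  · show applyEv (applyEv (pvSet2 (mform2 M N f) (i + 1) (j + 1) [1, 1]) (i, j + 1, 1)) (i + 1, j, 0) = _
    simp only [List.foldl_cons, List.foldl_nil]
    rw [pvSet2_mform2_11 M N f (i + 1) (j + 1) hi hj,
        applyEv_mform2 M N f (i + 1) (j + 1) 0 hi hj (by omega),
        applyEv_mform2 M N _ (i + 1) (j + 1) 1 hi hj (by omega),
        applyEv_mform2 M N _ i (j + 1) 1 (by omega) hj (by omega),
        applyEv_mform2 M N _ i (j + 1) 1 (by omega) hj (by omega),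
        applyEv_mform2 M N _ (i + 1) j 0 hi (by omega) (by omega),
        applyEv_mform2 M N _ (i + 1) j 0 hi (by omega) (by omega)]
    apply mform2_congr
    intro x _ y _
    by_cases h1 : x = i + 1 ∧ y = j + 1 <;> by_cases h2 : x = i ∧ y = j + 1 <;>
      by_cases h3 : x = i + 1 ∧ y = j <;>
      simp [h1, h2, h3, updP]
  · simp

theorem complex_converter_spec : Claim_equal_complex_converter := by
  intro a m n t _ hpre
  unfold Spec_complex_converter
  simp only [complex_converter, complex_converter_alt]
  rw [build_eq, stage2_eq]
  cases t with
  | true =>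
    simp only [if_true]
    rw [foldl_cells ((n + 1).toNat)
      (fun mat i j =>
        let w := (a.getD i []).getD j 0
        let mat2 := if PySem.Int.mod w 2 = 1 then pvSet3 mat (i + 1) j 0 1 else mat
        if PySem.Int.floordiv w 2 = 1 then pvSet3 mat2 i (j + 1) 1 1 else mat2)
      ((m + 1).toNat)]
    have hrange : ∀ c ∈ cellsL ((m + 1).toNat) ((n + 1).toNat), ∀ e ∈ evsThin a c,
        e.1 < (m + 1).toNat ∧ e.2.1 < (n + 1).toNat ∧ e.2.2 < 2 := by
      intro c hc e he
      rw [mem_cellsL] at hc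
      obtain ⟨i, j⟩ := c
      obtain ⟨hi, hj⟩ := hc
      simp only [evsThin, List.mem_append, mem_if_singleton] at he
      unfold Pre_complex_converter at hpre
      rw [if_pos rfl] at hpre
      rcases hpre with h0 | h0 | ⟨_, _, hrow, hcol⟩
      · omega
      · omega
      · rcases he with ⟨hcnd, rfl⟩ | ⟨hcnd, rfl⟩
        · dsimp only
          refine ⟨?_, hj, by omega⟩
          by_cases hiM : i = (m + 1).toNat - 1
          · exact absurd (hiM ▸ hcnd) (hrow j hj)
          · omega
        · dsimp only
          refine ⟨hi, ?_, by omega⟩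
          by_cases hjN : j = (n + 1).toNat - 1
          · exact absurd (hjN ▸ hcnd) (hcol i hi)
          · omega
    rw [fold_body_events ((m + 1).toNat) ((n + 1).toNat) _ (evsThin a)
          (cellsL ((m + 1).toNat) ((n + 1).toNat)) (basePair ((m + 1).toNat) ((n + 1).toNat))
          (fun f2 c _ => by obtain ⟨i, j⟩ := c; exact bodyThin_ev a (mform2 _ _ f2) i j)
          hrange,
        ev_fold ((m + 1).toNat) ((n + 1).toNat) _ _
          (by intro e he
              rw [List.mem_flatMap] at he
              obtain ⟨c, hc, he⟩ := he
              exact hrange c hc e he)]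
    show _ = mform ((m + 1).toNat) ((n + 1).toNat)
      (fun i j => pvCellB a m n true ((m + 1).toNat) ((n + 1).toNat) i j)
    unfold mform2
    apply mform_congr
    intro i hi j hj
    have h0 : ((i, j, (0 : Nat)) ∈ (cellsL ((m + 1).toNat) ((n + 1).toNat)).flatMap (evsThin a)) ↔
        (1 ≤ i ∧ PySem.Int.mod ((a.getD (i - 1) []).getD j 0) 2 = 1) := by
      rw [memThin]
      constructor
      · rintro ⟨i0, hi0, j0, hj0, ⟨hc, h1, h2, _⟩ | ⟨_, _, _, hk⟩⟩
        · refine ⟨by omega, ?_⟩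
          have hii : i - 1 = i0 := by omega
          rw [hii, h2]
          exact hc
        · omega
      · rintro ⟨h1, hc⟩
        exact ⟨i - 1, by omega, j, hj, Or.inl ⟨hc, by omega, rfl, rfl⟩⟩
    have h1m : ((i, j, (1 : Nat)) ∈ (cellsL ((m + 1).toNat) ((n + 1).toNat)).flatMap (evsThin a)) ↔
        (1 ≤ j ∧ PySem.Int.floordiv ((a.getD i []).getD (j - 1) 0) 2 = 1) := by
      rw [memThin]
      constructor
      · rintro ⟨i0, hi0, j0, hj0, ⟨_, _, _, hk⟩ | ⟨hc, h1, h2, _⟩⟩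
        · omega
        · refine ⟨by omega, ?_⟩
          have hjj : j - 1 = j0 := by omega
          rw [hjj, h1]
          exact hc
      · rintro ⟨h1, hc⟩
        exact ⟨i, hi, j - 1, by omega, Or.inr ⟨hc, rfl, by omega, rfl⟩⟩
    simp only [h0, h1m]
    simp only [pvCellB, basePair]
    simp only [if_true, Bool.or_eq_true, Bool.and_eq_true, decide_eq_true_eq]
    by_cases hA : 1 ≤ i ∧ PySem.Int.mod ((a.getD (i - 1) []).getD j 0) 2 = 1 <;>
      by_cases hB : (j = 0 ∨ j = (n + 1).toNat - 1) ∧ 0 < i <;>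
      by_cases hC : 1 ≤ j ∧ PySem.Int.floordiv ((a.getD i []).getD (j - 1) 0) 2 = 1 <;>
      by_cases hD : (i = 0 ∨ i = (m + 1).toNat - 1) ∧ 0 < j <;>
      simp [hA, hB, hC, hD]
  | false =>
    simp only [Bool.false_eq_true, if_false]
    rw [foldl_cells ((n + 1).toNat - 1)
      (fun mat i j =>
        if (a.getD i []).getD j 0 ≠ 0 then
          let mat2 := pvSet2 mat (i + 1) (j + 1) [1, 1]
          let mat3 := pvSet3 mat2 i (j + 1) 1 1
          pvSet3 mat3 (i + 1) j 0 1
        else mat)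
      ((m + 1).toNat - 1)]
    have hrange : ∀ c ∈ cellsL ((m + 1).toNat - 1) ((n + 1).toNat - 1), ∀ e ∈ evsThick a c,
        e.1 < (m + 1).toNat ∧ e.2.1 < (n + 1).toNat ∧ e.2.2 < 2 := by
      intro c hc e he
      rw [mem_cellsL] at hc
      obtain ⟨i, j⟩ := c
      obtain ⟨hi, hj⟩ := hc
      simp only [evsThick, mem_if_nil, List.mem_cons, List.not_mem_nil, or_false] at he
      obtain ⟨-, he⟩ := he
      rcases he with rfl | rfl | rfl | rfl <;> refine ⟨?_, ?_, ?_⟩ <;> dsimp only <;> omega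
    rw [fold_body_events ((m + 1).toNat) ((n + 1).toNat) _ (evsThick a)
          (cellsL ((m + 1).toNat - 1) ((n + 1).toNat - 1)) (basePair ((m + 1).toNat) ((n + 1).toNat))
          (fun f2 c hc => by
            obtain ⟨i, j⟩ := c
            rw [mem_cellsL] at hc
            exact bodyThick_ev a ((m + 1).toNat) ((n + 1).toNat) f2 i j (by omega) (by omega))
          hrange,
        ev_fold ((m + 1).toNat) ((n + 1).toNat) _ _
          (by intro e he
              rw [List.mem_flatMap] at he
              obtain ⟨c, hc, he⟩ := he
              exact hrange c hc e he)]
    show _ = mform ((m + 1).toNat) ((n + 1).toNat)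
      (fun i j => pvCellB a m n false ((m + 1).toNat) ((n + 1).toNat) i j)
    unfold mform2
    apply mform_congr
    intro i hi j hj
    have e1 : ((i : Int) - 1).toNat = i - 1 := by omega
    have e2 : ((j : Int) - 1).toNat = j - 1 := by omega
    have h0 : ((i, j, (0 : Nat)) ∈ (cellsL ((m + 1).toNat - 1) ((n + 1).toNat - 1)).flatMap (evsThick a)) ↔
        (pvBlocked a m n ((i : Int) - 1) ((j : Int) - 1) = true ∨ pvBlocked a m n ((i : Int) - 1) (j : Int) = true) := by
      rw [memThick]
      simp only [pvBlocked, Bool.and_eq_true, decide_eq_true_eq, bne_iff_ne, ne_eq, e1, e2,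
        Int.toNat_natCast, and_assoc]
      constructor
      · rintro ⟨i0, hi0, j0, hj0, hz, ⟨h1, h2, h3⟩ | ⟨h1, h2, h3⟩ | ⟨h1, h2, h3⟩ | ⟨h1, h2, h3⟩⟩
        · refine Or.inl ⟨by omega, by omega, by omega, by omega, ?_⟩
          have g1 : i - 1 = i0 := by omega
          have g2 : j - 1 = j0 := by omega
          rw [g1, g2]; exact hz
        · omega
        · omega
        · refine Or.inr ⟨by omega, by omega, by omega, by omega, ?_⟩
          have g1 : i - 1 = i0 := by omega
          have g2 : j = j0 := by omega
          rw [g1, g2]; exact hz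
      · rintro (⟨h1, h2, h3, h4, h5⟩ | ⟨h1, h2, h3, h4, h5⟩)
        · exact ⟨i - 1, by omega, j - 1, by omega, h5, Or.inl ⟨by omega, by omega, trivial⟩⟩
        · exact ⟨i - 1, by omega, j, by omega, h5, Or.inr (Or.inr (Or.inr ⟨by omega, by omega, trivial⟩))⟩
    have h1m : ((i, j, (1 : Nat)) ∈ (cellsL ((m + 1).toNat - 1) ((n + 1).toNat - 1)).flatMap (evsThick a)) ↔
        (pvBlocked a m n ((i : Int) - 1) ((j : Int) - 1) = true ∨ pvBlocked a m n (i : Int) ((j : Int) - 1) = true) := by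
      rw [memThick]
      simp only [pvBlocked, Bool.and_eq_true, decide_eq_true_eq, bne_iff_ne, ne_eq, e1, e2,
        Int.toNat_natCast, and_assoc]
      constructor
      · rintro ⟨i0, hi0, j0, hj0, hz, ⟨h1, h2, h3⟩ | ⟨h1, h2, h3⟩ | ⟨h1, h2, h3⟩ | ⟨h1, h2, h3⟩⟩
        · omega
        · refine Or.inl ⟨by omega, by omega, by omega, by omega, ?_⟩
          have g1 : i - 1 = i0 := by omega
          have g2 : j - 1 = j0 := by omega
          rw [g1, g2]; exact hz
        · refine Or.inr ⟨by omega, by omega, by omega, by omega, ?_⟩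
          have g1 : i = i0 := by omega
          have g2 : j - 1 = j0 := by omega
          rw [g1, g2]; exact hz
        · omega
      · rintro (⟨h1, h2, h3, h4, h5⟩ | ⟨h1, h2, h3, h4, h5⟩)
        · exact ⟨i - 1, by omega, j - 1, by omega, h5, Or.inr (Or.inl ⟨by omega, by omega, trivial⟩)⟩
        · exact ⟨i, by omega, j - 1, by omega, h5, Or.inr (Or.inr (Or.inl ⟨by omega, by omega, trivial⟩))⟩
    simp only [h0, h1m]
    simp only [pvCellB, Bool.false_eq_true, if_false, Bool.or_eq_true, Bool.and_eq_true,
      decide_eq_true_eq]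
    by_cases hA : pvBlocked a m n ((i : Int) - 1) ((j : Int) - 1) = true <;>
      by_cases hB : pvBlocked a m n ((i : Int) - 1) (j : Int) = true <;>
      by_cases hC : pvBlocked a m n (i : Int) ((j : Int) - 1) = true <;>
      by_cases hD : (j = 0 ∨ j = (n + 1).toNat - 1) ∧ 0 < i <;>
      by_cases hE : (i = 0 ∨ i = (m + 1).toNat - 1) ∧ 0 < j <;>
      simp [basePair, hA, hB, hC, hD, hE]
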